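-- pv_equiv track=rewrite | github.com/rg1107/leetcode | 4257-sum-of-sortable-integers/sum-of-sortable-integers.py | operation
-- ===== SOURCE A (Python) =====
-- def operation(k, nums):
--     n = len(nums)
--     chunks = n // k
--     minMax = []
--
--     for i in range(chunks):
--         start = i * k
--         mini = float('inf')
--         maxi = float('-inf')
--         cnt = 0
--
--         for j in range(k):
--             curr = nums[start + j]
--             next_val = nums[start + (j + 1) % k]
--
--             mini = min(mini, curr)
--             maxi = max(maxi, curr)
--
--             if curr > next_val:
--                 cnt += 1
--
--         if cnt > 1:
--             return False
--
--         minMax.append((mini, maxi))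
--
--     for i in range(chunks - 1):
--         if minMax[i][1] > minMax[i + 1][0]:
--             return False
--
--     return True
-- ===== SOURCE B (Python) =====
-- def operation(k, nums):
--     chunks = len(nums) // k
--     flat = []
--     for i in range(chunks):
--         s = nums[i * k:(i + 1) * k]
--         sc = sorted(s)
--         if not any(s == sc[r:] + sc[:r] for r in range(k)):
--             return False
--         flat.extend(sc)
--     return all(flat[j] <= flat[j + 1] for j in range(len(flat) - 1))
-- ===== Notes on version B (the rewrite author's own statement) =====
-- stated objective: alternative
-- what changed: Instead of counting circular descents per chunk and comparing stored per-chunk (min,max) pairs in a second pass, B sorts each chunk, tests that the chunk is a rotation of its own sorted copy, and checks that the concatenation of the sorted chunks is globally nondecreasing.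
import Mathlib
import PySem

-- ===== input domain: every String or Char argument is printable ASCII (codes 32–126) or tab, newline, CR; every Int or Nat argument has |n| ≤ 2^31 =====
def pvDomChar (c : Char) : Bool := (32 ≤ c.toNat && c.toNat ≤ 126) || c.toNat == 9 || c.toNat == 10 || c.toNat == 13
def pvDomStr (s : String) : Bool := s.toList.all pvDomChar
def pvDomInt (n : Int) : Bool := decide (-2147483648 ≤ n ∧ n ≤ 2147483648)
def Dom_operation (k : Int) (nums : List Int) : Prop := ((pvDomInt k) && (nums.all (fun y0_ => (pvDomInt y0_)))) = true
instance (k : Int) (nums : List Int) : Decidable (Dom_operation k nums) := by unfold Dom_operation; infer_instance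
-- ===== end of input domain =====

-- B replaces A's descent counting and min/max bookkeeping by a sort-based algorithm: each chunk is
-- sorted and tested to be a rotation of its own sorted copy, and the sorted chunks are concatenated
-- and checked to be globally nondecreasing. Equal on all inputs with k ≠ 0.

-- ===== PORT A =====
-- inner 'for j in range(k)' loop: state (mini, maxi, cnt); mini/maxi start as float('inf')/-inf,
-- modelled as Option Int (none = not yet set; k ≥ 1 whenever the body runs, so they are always set).
-- nums[start+j] is always in range when the loop runs (i < n//k), so pyGet? … |>.getD 0 never defaults.
def opInner (nums : List Int) (start : Int) (k : Int) : Option Int × Option Int × Int :=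
  (List.range k.toNat).foldl
    (fun st (j : Nat) =>
      let curr := (PySem.List.pyGet? nums (start + (j : Int))).getD 0
      let next_val := (PySem.List.pyGet? nums (start + PySem.Int.mod ((j : Int) + 1) k)).getD 0
      (some (match st.1 with | none => curr | some m => min m curr),
       some (match st.2.1 with | none => curr | some m => max m curr),
       st.2.2 + (if curr > next_val then 1 else 0)))
    (none, none, 0)

-- first 'for i in range(chunks)' loop: builds minMax, none = early 'return False'
def opLoop1 (k : Int) (nums : List Int) : List Nat → List (Int × Int) → Option (List (Int × Int))
  | [], acc => some acc
  | i :: rest, acc =>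
    let start := (i : Int) * k
    let r := opInner nums start k
    if r.2.2 > 1 then none
    else opLoop1 k nums rest (acc ++ [(r.1.getD 0, r.2.1.getD 0)])

-- second loop 'for i in range(chunks-1)': adjacent-pair walk over minMax
def opLoop2 : List (Int × Int) → Bool
  | a :: b :: rest => if a.2 > b.1 then false else opLoop2 (b :: rest)
  | _ => true

def operation (k : Int) (nums : List Int) : Bool :=
  let n : Int := nums.length
  let chunks := PySem.Int.floordiv n k
  match opLoop1 k nums (List.range chunks.toNat) [] with
  | none => false
  | some minMax => opLoop2 minMax

-- ===== PORT B =====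
-- 'any(s == sc[r:] + sc[:r] for r in range(k))': is the chunk a rotation of its sorted copy?
def altRotOk (s sc : List Int) (k : Int) : Bool :=
  (List.range k.toNat).any (fun r =>
    s == PySem.List.slice sc (some (r : Int)) none ++ PySem.List.slice sc none (some (r : Int)))

-- 'for i in range(chunks)' loop: none = early 'return False', otherwise the accumulated flat list
def altLoop (k : Int) (nums : List Int) : List Nat → List Int → Option (List Int)
  | [], flat => some flat
  | i :: rest, flat =>
    let s := PySem.List.slice nums (some ((i : Int) * k)) (some (((i : Int) + 1) * k))
    let sc := PySem.List.sorted s (fun x => x)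
    if altRotOk s sc k then altLoop k nums rest (flat ++ sc) else none

def operation_alt (k : Int) (nums : List Int) : Bool :=
  let chunks := PySem.Int.floordiv (nums.length : Int) k
  match altLoop k nums (List.range chunks.toNat) [] with
  | none => false
  | some flat =>
    (List.range (flat.length - 1)).all (fun j =>
      decide ((PySem.List.pyGet? flat (j : Int)).getD 0 ≤ (PySem.List.pyGet? flat ((j : Int) + 1)).getD 0))

-- ===== PRECONDITION & SPEC =====
-- Pre_ excludes exactly k = 0, where the Python A raises ZeroDivisionError on n // k.
def Pre_operation (k : Int) (nums : List Int) : Prop := k ≠ 0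
instance (k : Int) (nums : List Int) : Decidable (Pre_operation k nums) := by unfold Pre_operation; infer_instance
def pvWitness_operation : Int × List Int := (2, [1, 2, 3, 4])

def Spec_operation (k : Int) (nums : List Int) (out : Bool) : Prop := out = operation_alt k nums
instance (k : Int) (nums : List Int) (out : Bool) : Decidable (Spec_operation k nums out) := by unfold Spec_operation; infer_instance

-- ===== CLAIM (what is proved, stated in full; the proofs are below) =====
def Claim_equal_operation : Prop := ∀ (k : Int) (nums : List Int), Dom_operation k nums → Pre_operation k nums → Spec_operation k nums (operation k nums)

-- ===== LEMMAS AND PROOFS =====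

-- proof-side abbreviations
def csOf (k : Int) (nums : List Int) (i : Nat) : List Int := (nums.drop (i * k.toNat)).take k.toNat

def chunkTrip (k : Int) (nums : List Int) (i : Nat) : Int × Int × Int :=
  let r := opInner nums ((i : Int) * k) k
  (r.1.getD 0, r.2.1.getD 0, r.2.2)

-- number of circular descents of a chunk
def cdesc (s : List Int) : Nat :=
  (List.range s.length).countP (fun j => decide (s.getD j 0 > s.getD ((j + 1) % s.length) 0))

theorem opLoop1_char (k : Int) (nums : List Int) (is : List Nat) (acc : List (Int × Int)) :
    opLoop1 k nums is acc =
      if is.all (fun i => (chunkTrip k nums i).2.2 ≤ 1)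
      then some (acc ++ is.map (fun i => ((chunkTrip k nums i).1, (chunkTrip k nums i).2.1)))
      else none := by
  induction is generalizing acc with
  | nil => simp [opLoop1]
  | cons i rest ih =>
    simp only [opLoop1, chunkTrip, List.all_cons, List.map_cons]
    by_cases h : (opInner nums ((i : Int) * k) k).2.2 > 1
    · simp [h, show ¬ (opInner nums ((i : Int) * k) k).2.2 ≤ 1 by omega]
    · rw [if_neg h, ih]
      simp [chunkTrip, show (opInner nums ((i : Int) * k) k).2.2 ≤ 1 by omega]

theorem altLoop_char (k : Int) (nums : List Int) (hk : 0 < k) (is : List Nat) (flat : List Int) :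
    altLoop k nums is flat =
      if is.all (fun i => altRotOk (csOf k nums i) (PySem.List.sorted (csOf k nums i) (fun x => x)) k)
      then some (flat ++ is.flatMap (fun i => PySem.List.sorted (csOf k nums i) (fun x => x)))
      else none := by
  have hslice : ∀ i : Nat,
      PySem.List.slice nums (some ((i : Int) * k)) (some (((i : Int) + 1) * k)) = csOf k nums i := by
    intro i
    have hkK : ((k.toNat : Nat) : Int) = k := Int.toNat_of_nonneg hk.le
    have h1 : (i : Int) * k = ((i * k.toNat : Nat) : Int) := by push_cast [hkK]; ring
    have h2 : ((i : Int) + 1) * k = ((i * k.toNat : Nat) : Int) + ((k.toNat : Nat) : Int) := by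
      push_cast [hkK]; ring
    rw [h1, h2, PySem.List.slice_natCast_add]; rfl
  induction is generalizing flat with
  | nil => simp [altLoop]
  | cons i rest ih =>
    simp only [altLoop, hslice i, List.all_cons, List.flatMap_cons]
    by_cases h : altRotOk (csOf k nums i) (PySem.List.sorted (csOf k nums i) (fun x => x)) k = true
    · rw [if_pos h, ih, h]
      simp [List.append_assoc]
    · rw [if_neg h]
      simp [h]

theorem opLoop2_iff (l : List (Int × Int)) :
    opLoop2 l = true ↔ List.IsChain (fun a b : Int × Int => a.2 ≤ b.1) l := by
  induction l with
  | nil => simp [opLoop2, List.isChain_nil]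
  | cons a l ih =>
    cases l with
    | nil => simp [opLoop2, List.isChain_singleton]
    | cons b rest =>
      rw [List.isChain_cons_cons, ← ih]
      show (if a.2 > b.1 then false else opLoop2 (b :: rest)) = true ↔ _
      by_cases h : a.2 > b.1
      · simp [h, show ¬ a.2 ≤ b.1 by omega]
      · simp [h, show a.2 ≤ b.1 by omega]

-- a Nodup list on which the predicate pins its element has countP ≤ 1
theorem countP_le_one_of_unique (l : List Nat) (p : Nat → Bool) (j0 : Nat) (hnd : l.Nodup)
    (h : ∀ x ∈ l, p x = true → x = j0) : l.countP p ≤ 1 := by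
  induction l with
  | nil => simp
  | cons a t ih =>
    rw [List.countP_cons]
    rcases List.nodup_cons.mp hnd with ⟨ha, hndt⟩
    have hcle := ih hndt (fun x hx hp => h x (List.mem_cons_of_mem _ hx) hp)
    by_cases hp : p a = true
    · have haj : a = j0 := h a List.mem_cons_self hp
      have ht0 : t.countP p = 0 := by
        rw [List.countP_eq_zero]
        intro x hx hpx
        have hxj : x = j0 := h x (List.mem_cons_of_mem _ hx) hpx
        apply ha
        rw [haj, ← hxj]
        exact hx
      simp [ht0, hp]
    · simpa [hp] using hcle

theorem two_le_countP (l : List Nat) (p : Nat → Bool) (a b : Nat) (hnd : l.Nodup)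
    (hab : a ≠ b) (ha : a ∈ l) (hb : b ∈ l) (hpa : p a = true) (hpb : p b = true) :
    2 ≤ l.countP p := by
  induction l with
  | nil => simp at ha
  | cons x t ih =>
    rw [List.countP_cons]
    rcases List.nodup_cons.mp hnd with ⟨hx, hndt⟩
    by_cases hxa : a = x
    · subst hxa
      have hbt : b ∈ t := by
        rcases List.mem_cons.mp hb with h' | h'
        · exact absurd h'.symm hab
        · exact h'
      have h1 : 0 < t.countP p := List.countP_pos_iff.mpr ⟨b, hbt, hpb⟩
      rw [if_pos hpa]; omega
    · by_cases hxb : b = x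
      · subst hxb
        have hat : a ∈ t := by
          rcases List.mem_cons.mp ha with h' | h'
          · exact absurd h' hxa
          · exact h'
        have h1 : 0 < t.countP p := List.countP_pos_iff.mpr ⟨a, hat, hpa⟩
        rw [if_pos hpb]; omega
      · have hat : a ∈ t := by
          rcases List.mem_cons.mp ha with h' | h'
          · exact absurd h' hxa
          · exact h'
        have hbt : b ∈ t := by
          rcases List.mem_cons.mp hb with h' | h'
          · exact absurd h' hxb
          · exact h'
        have := ih hndt hat hbt
        omega

theorem mod_two_case (K j r : Nat) (hj : j < K) (hr : r < K) :
    (j + r) % K = if j + r < K then j + r else j + r - K := by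
  split_ifs with h
  · exact Nat.mod_eq_of_lt h
  · rw [Nat.mod_eq_sub_mod (by omega)]
    exact Nat.mod_eq_of_lt (by omega)

theorem getD_eq (s : List Int) (j : Nat) (h : j < s.length) : s.getD j 0 = s[j] :=
  List.getD_eq_getElem s 0 h

theorem pairwise_le_getLast? (l : List Int) (hp : l.Pairwise (fun a b : Int => a ≤ b))
    {a : Int} (ha : l.getLast? = some a) : a ∈ l ∧ ∀ z ∈ l, z ≤ a := by
  induction l with
  | nil => simp at ha
  | cons x t ih =>
    cases t with
    | nil =>
      simp only [List.getLast?_singleton, Option.some.injEq] at ha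
      subst ha; simp
    | cons y ys =>
      rw [List.getLast?_cons_cons] at ha
      rcases List.pairwise_cons.mp hp with ⟨hx, hpt⟩
      rcases ih hpt ha with ⟨hmem, hbound⟩
      refine ⟨List.mem_cons_of_mem _ hmem, ?_⟩
      intro z hz
      rcases List.mem_cons.mp hz with rfl | hzt
      · exact le_trans (hx a hmem) (le_refl a)
      · exact hbound z hzt

theorem sorted_head? (x : Int) (t : List Int) :
    (PySem.List.sorted (x :: t) (fun y => y)).head? = some (t.foldl min x) := by
  rcases hsc : PySem.List.sorted (x :: t) (fun y => y) with _ | ⟨y, ys⟩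
  · exact absurd ((PySem.List.sorted_eq_nil_iff _ _ _).mp hsc) (by simp)
  · simp only [List.head?_cons, Option.some.injEq]
    have hyle := PySem.List.key_head_sorted_le (x :: t) (fun y => y) hsc
    have hymem : y ∈ x :: t := by
      rw [← PySem.List.mem_sorted (x :: t) (fun y => y) false y, hsc]
      exact List.mem_cons_self
    have h1 := PySem.List.foldl_min_le t x
    have h2 := PySem.List.foldl_min_mem t x
    have hmmem : List.foldl min x t ∈ x :: t := by
      rcases h2 with h | h
      · rw [h]; exact List.mem_cons_self
      · exact List.mem_cons_of_mem _ h
    apply le_antisymm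
    · exact hyle _ hmmem
    · rcases List.mem_cons.mp hymem with rfl | hyt
      · exact h1.1
      · exact h1.2 y hyt

theorem sorted_last? (x : Int) (t : List Int) :
    (PySem.List.sorted (x :: t) (fun y => y)).getLast? = some (t.foldl max x) := by
  rcases hlast : (PySem.List.sorted (x :: t) (fun y => y)).getLast? with _ | a
  · rw [List.getLast?_eq_none_iff] at hlast
    exact absurd ((PySem.List.sorted_eq_nil_iff _ _ _).mp hlast) (by simp)
  · have hp := PySem.List.sorted_pairwise (x :: t) (fun y => y)
    rcases pairwise_le_getLast? _ hp hlast with ⟨hmem, hbound⟩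
    have hamem : a ∈ x :: t := (PySem.List.mem_sorted (x :: t) (fun y => y) false a).mp hmem
    have h1 := PySem.List.le_foldl_max t x
    have h2 := PySem.List.foldl_max_mem t x
    have hm_mem : t.foldl max x ∈ x :: t := by
      rcases h2 with h | h
      · rw [h]; exact List.mem_cons_self
      · exact List.mem_cons_of_mem _ h
    have : a = t.foldl max x := by
      apply le_antisymm
      · rcases List.mem_cons.mp hamem with rfl | hat
        · exact h1.1
        · exact h1.2 a hat
      · exact hbound _ ((PySem.List.mem_sorted (x :: t) (fun y => y) false _).mpr hm_mem)
    rw [this]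

-- the crux: a chunk equals some rotation of its sorted copy iff it has at most one circular descent
theorem rotOk_iff (k : Int) (s : List Int) (hk : 0 < k) (hlen : s.length = k.toNat) (hs : s ≠ []) :
    altRotOk s (PySem.List.sorted s (fun x => x)) k = decide (cdesc s ≤ 1) := by
  have hK1 : 0 < s.length := List.length_pos_iff.mpr hs
  set sc := PySem.List.sorted s (fun x => x) with hscdef
  have hscK : sc.length = s.length := by rw [hscdef, PySem.List.length_sorted]
  have hsliceq : ∀ r : Nat, PySem.List.slice sc (some (r : Int)) none = sc.drop r ∧
      PySem.List.slice sc none (some (r : Int)) = sc.take r := by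
    intro r
    constructor
    · rw [PySem.List.slice_from sc (Int.natCast_nonneg r)]; simp
    · rw [PySem.List.slice_to sc (Int.natCast_nonneg r)]; simp
  rw [altRotOk, ← hlen, Bool.eq_iff_iff, List.any_eq_true, decide_eq_true_eq, cdesc]
  constructor
  · rintro ⟨r, hr, hbeq⟩
    have hrK : r < s.length := List.mem_range.mp hr
    have hrot : s = sc.rotate r := by
      rw [List.rotate_eq_drop_append_take (by omega : r ≤ sc.length), ← (hsliceq r).1, ← (hsliceq r).2]
      exact beq_iff_eq.mp hbeq
    have hrotlen : (sc.rotate r).length = s.length := by rw [List.length_rotate, hscK]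
    have hgetD : ∀ j, j < s.length → s.getD j 0 = sc.getD ((j + r) % s.length) 0 := by
      intro j hj
      have hmlt : (j + r) % s.length < s.length := Nat.mod_lt _ (by omega)
      rw [getD_eq s j hj, getD_eq sc _ (by omega)]
      have h1 : s[j] = (sc.rotate r)[j]'(by omega) := List.getElem_of_eq hrot hj
      rw [h1, List.getElem_rotate]
      have h2 : (j + r) % sc.length = (j + r) % s.length := by rw [hscK]
      simp only [h2]
    have huniq : ∀ j ∈ List.range s.length,
        (decide (s.getD j 0 > s.getD ((j + 1) % s.length) 0)) = true → j = s.length - 1 - r := by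
      intro j hjmem hpred
      have hjK : j < s.length := List.mem_range.mp hjmem
      rw [decide_eq_true_eq] at hpred
      have hm1 : (j + 1) % s.length < s.length := Nat.mod_lt _ (by omega)
      rw [hgetD j hjK, hgetD _ hm1] at hpred
      have e1 : ((j + 1) % s.length + r) % s.length = ((j + r) % s.length + 1) % s.length := by
        rw [Nat.mod_add_mod, Nat.mod_add_mod]
        ring_nf
      rw [e1] at hpred
      set p := (j + r) % s.length with hpdef
      have hpL : p < s.length := Nat.mod_lt _ (by omega)
      have hplast : p = s.length - 1 := by
        by_contra hcon
        have hp1 : p + 1 < s.length := by omega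
        have hm2 : (p + 1) % s.length = p + 1 := Nat.mod_eq_of_lt hp1
        rw [hm2, getD_eq sc p (by omega), getD_eq sc (p + 1) (by omega)] at hpred
        have hmono := PySem.List.sorted_id_getElem_mono s (by omega : p ≤ p + 1)
          (by rw [PySem.List.length_sorted]; omega)
        simp only [← hscdef] at hmono
        omega
      have hcase := mod_two_case s.length j r hjK hrK
      rw [← hpdef] at hcase
      split_ifs at hcase <;> omega
    exact countP_le_one_of_unique _ _ (s.length - 1 - r) List.nodup_range huniq
  · intro hcdle
    by_cases hlin : ∃ d, d + 1 < s.length ∧ s.getD d 0 > s.getD (d + 1) 0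
    · obtain ⟨d, hd, hgt⟩ := hlin
      have hdmod : (d + 1) % s.length = d + 1 := Nat.mod_eq_of_lt hd
      have hpredd : (decide (s.getD d 0 > s.getD ((d + 1) % s.length) 0)) = true := by
        rw [hdmod]; exact decide_eq_true hgt
      have hother : ∀ j, j < s.length → j ≠ d → ¬ s.getD j 0 > s.getD ((j + 1) % s.length) 0 := by
        intro j hj hne hcon
        have h2 := two_le_countP (List.range s.length)
          (fun j => decide (s.getD j 0 > s.getD ((j + 1) % s.length) 0)) j d
          List.nodup_range hne (List.mem_range.mpr hj) (List.mem_range.mpr (by omega))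
          (decide_eq_true hcon) hpredd
        omega
      set m := d + 1 with hmdef
      have hmL : m < s.length := hd
      have hchain : List.IsChain (fun a b : Int => a ≤ b) (s.rotate m) := by
        rw [List.isChain_iff_getElem]
        intro idx hidx
        have hidxL : idx + 1 < s.length := by
          rw [List.length_rotate] at hidx; exact hidx
        rw [List.getElem_rotate, List.getElem_rotate]
        set p := (idx + m) % s.length with hpdef
        have hpL : p < s.length := Nat.mod_lt _ (by omega)
        have hpne : p ≠ d := by
          intro hcon
          have hcase := mod_two_case s.length idx m (by omega) hmL
          rw [← hpdef] at hcase
          split_ifs at hcase <;> omega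
        have hnext : (idx + 1 + m) % s.length = (p + 1) % s.length := by
          rw [hpdef, Nat.mod_add_mod]
          ring_nf
        have hle : s.getD p 0 ≤ s.getD ((p + 1) % s.length) 0 := not_lt.mp (hother p hpL hpne)
        rw [getD_eq s p hpL, getD_eq s _ (Nat.mod_lt _ (by omega))] at hle
        simp only [show (idx + m) % s.length = p from hpdef.symm, hnext]
        exact hle
      have hsc_t : sc = s.rotate m := by
        rw [hscdef]
        exact PySem.List.sorted_id_eq_of_perm_of_pairwise s (s.rotate m)
          (List.rotate_perm s m) hchain.pairwise
      refine ⟨s.length - m, List.mem_range.mpr (by omega), ?_⟩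
      rw [(hsliceq _).1, (hsliceq _).2, hsc_t,
        List.rotate_eq_drop_append_take (le_of_lt hmL),
        show s.length - m = (s.drop m).length from by simp,
        List.drop_left, List.take_left, beq_iff_eq]
      exact (List.take_append_drop m s).symm
    · push_neg at hlin
      have hpair : s.Pairwise (fun a b : Int => a ≤ b) := by
        apply List.IsChain.pairwise
        rw [List.isChain_iff_getElem]
        intro idx hidx
        have := hlin idx hidx
        rw [getD_eq s idx (by omega), getD_eq s (idx + 1) (by omega)] at this
        omega
      have hsc_s : sc = s := by
        rw [hscdef]
        exact PySem.List.sorted_eq_self_of_pairwise s (fun x => x) hpair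
      refine ⟨0, List.mem_range.mpr (by omega), ?_⟩
      rw [(hsliceq 0).1, (hsliceq 0).2, hsc_s, beq_iff_eq]
      simp

-- concatenation of sorted nonempty blocks is a nondecreasing chain iff adjacent blocks link up
theorem chain_flatten (L : List (List Int))
    (h : ∀ c ∈ L, c ≠ [] ∧ c.Pairwise (fun a b : Int => a ≤ b)) :
    List.IsChain (fun a b : Int => a ≤ b) L.flatten ↔
      List.IsChain (fun A B : List Int => ∀ a ∈ A.getLast?, ∀ b ∈ B.head?, a ≤ b) L := by
  induction L with
  | nil => simp [List.isChain_nil]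
  | cons A L ih =>
    have hA := h A List.mem_cons_self
    have hchainA : List.IsChain (fun a b : Int => a ≤ b) A := hA.2.isChain
    rw [List.flatten_cons, List.isChain_append]
    cases L with
    | nil =>
      simp [List.isChain_singleton, hchainA, List.isChain_nil]
    | cons B t =>
      have hB := (h B (List.mem_cons_of_mem _ List.mem_cons_self)).1
      rw [List.isChain_cons_cons, ← ih (fun c hc => h c (List.mem_cons_of_mem _ hc))]
      have hhead : ((B :: t).flatten).head? = B.head? := by
        rw [List.flatten_cons]
        exact List.head?_append_of_ne_nil B hB
      rw [hhead]
      tauto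

-- the final 'all(flat[j] <= flat[j+1] …)' is exactly the chain property
theorem flatOk_iff (flat : List Int) :
    ((List.range (flat.length - 1)).all (fun j =>
      decide ((PySem.List.pyGet? flat (j : Int)).getD 0 ≤ (PySem.List.pyGet? flat ((j : Int) + 1)).getD 0)) = true)
    ↔ List.IsChain (fun a b : Int => a ≤ b) flat := by
  rw [List.all_eq_true, List.isChain_iff_getElem]
  constructor
  · intro h i hi
    have hmem : i ∈ List.range (flat.length - 1) := List.mem_range.mpr (by omega)
    have := h i hmem
    rw [decide_eq_true_eq] at this
    have h1 : ((i : Int) + 1) = ((i + 1 : Nat) : Int) := by push_cast; ring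
    rw [h1, PySem.List.pyGet?_natCast, PySem.List.pyGet?_natCast,
      List.getElem?_eq_getElem (by omega), List.getElem?_eq_getElem (by omega)] at this
    simpa using this
  · intro h j hj
    have hjlt : j + 1 < flat.length := by have := List.mem_range.mp hj; omega
    rw [decide_eq_true_eq]
    have h1 : ((j : Int) + 1) = ((j + 1 : Nat) : Int) := by push_cast; ring
    rw [h1, PySem.List.pyGet?_natCast, PySem.List.pyGet?_natCast,
      List.getElem?_eq_getElem (by omega), List.getElem?_eq_getElem (by omega)]
    simpa using h j hjlt

-- three independent accumulators in one fold
theorem foldl_triple {γ α β δ : Type} (l : List γ) (f : α → γ → α) (g : β → γ → β)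
    (h : δ → γ → δ) (a : α) (b : β) (c : δ) :
    l.foldl (fun s e => (f s.1 e, g s.2.1 e, h s.2.2 e)) (a, b, c) =
      (l.foldl f a, l.foldl g b, l.foldl h c) := by
  induction l generalizing a b c with
  | nil => rfl
  | cons x t ih => simp [List.foldl_cons, ih]

theorem foldl_optmin (t : List Int) (v : Int) :
    t.foldl (fun m c => some (match m with | none => c | some x => min x c)) (some v) =
      some (t.foldl min v) := by
  induction t generalizing v with
  | nil => rfl
  | cons x r ih => simp [List.foldl_cons, ih]

theorem foldl_optmax (t : List Int) (v : Int) :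
    t.foldl (fun m c => some (match m with | none => c | some x => max x c)) (some v) =
      some (t.foldl max v) := by
  induction t generalizing v with
  | nil => rfl
  | cons x r ih => simp [List.foldl_cons, ih]

-- per-chunk decomposition of A's inner loop: chunk contents, running min/max, circular descent count
theorem chunk_abs (k : Int) (nums : List Int) (hk : 0 < k) (i : Nat)
    (hi : (i : Int) < PySem.Int.floordiv (nums.length : Int) k) :
    ∃ x t, csOf k nums i = x :: t ∧ (csOf k nums i).length = k.toNat ∧
      chunkTrip k nums i = (t.foldl min x, t.foldl max x, (cdesc (x :: t) : Int)) := by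
  set K : Nat := k.toNat with hKdef
  have hkK : k = (K : Int) := (Int.toNat_of_nonneg hk.le).symm
  have hK1 : 1 ≤ K := by omega
  have hbound : (i + 1) * K ≤ nums.length := by
    have h1 : ((i : Int) + 1) ≤ PySem.Int.floordiv (nums.length : Int) k := by omega
    rw [PySem.Int.le_floordiv_iff_mul_le hk] at h1
    have h2 : ((i : Int) + 1) * (K : Int) ≤ (nums.length : Int) := by rw [← hkK]; exact h1
    exact_mod_cast h2
  have hb2 : i * K + K ≤ nums.length := by simpa [add_mul, one_mul] using hbound
  set s : List Int := csOf k nums i with hsdef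
  have hs_eq : s = (nums.drop (i * K)).take K := by rw [hsdef, csOf]
  have hlen : s.length = K := by
    rw [hs_eq, List.length_take, List.length_drop]; omega
  have hgetq : ∀ m : Nat, m < K → s[m]? = nums[i * K + m]? := by
    intro m hm
    rw [hs_eq, List.getElem?_take_of_lt hm, List.getElem?_drop]
  set c : Nat → Int := fun j => (PySem.List.pyGet? nums ((i : Int) * k + (j : Int))).getD 0 with hcdef
  have hc_eq : ∀ j : Nat, j < K → c j = s.getD j 0 := by
    intro j hj
    have hcast : (i : Int) * k + (j : Int) = ((i * K + j : Nat) : Int) := by rw [hkK]; push_cast; ring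
    rw [hcdef]
    simp only
    rw [hcast, PySem.List.pyGet?_natCast, ← hgetq j hj, List.getD_eq_getElem?_getD]
  have hmapc : (List.range K).map c = s := by
    apply List.ext_getElem
    · simp [hlen]
    · intro j hj hj2
      have hjK : j < K := by simpa using hj
      simp only [List.getElem_map, List.getElem_range]
      rw [hc_eq j hjK, List.getD_eq_getElem s 0 (by omega)]
  obtain ⟨x, t, hxt⟩ : ∃ x t, s = x :: t := by
    cases hse : s with
    | nil => rw [hse] at hlen; simp at hlen; omega
    | cons x t => exact ⟨x, t, rfl⟩
  refine ⟨x, t, hxt, by rw [hlen], ?_⟩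
  have hinner : opInner nums ((i : Int) * k) k =
      ((List.range K).foldl (fun m j => some (match m with | none => c j | some x => min x (c j))) none,
       (List.range K).foldl (fun m j => some (match m with | none => c j | some x => max x (c j))) none,
       (List.range K).foldl (fun cnt j => cnt + (if c j > (PySem.List.pyGet? nums ((i : Int) * k + PySem.Int.mod ((j : Int) + 1) k)).getD 0 then 1 else 0)) (0 : Int)) := by
    simp only [opInner]
    exact foldl_triple (List.range K)
      (fun m (j : Nat) => some (match m with | none => c j | some x => min x (c j)))
      (fun m (j : Nat) => some (match m with | none => c j | some x => max x (c j)))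
      (fun (cnt : Int) (j : Nat) => cnt + (if c j > (PySem.List.pyGet? nums ((i : Int) * k + PySem.Int.mod ((j : Int) + 1) k)).getD 0 then 1 else 0))
      none none 0
  rw [chunkTrip]
  simp only [hinner]
  refine Prod.ext ?_ (Prod.ext ?_ ?_)
  · show (((List.range K).foldl (fun m j => some (match m with | none => c j | some x => min x (c j))) none).getD 0) = t.foldl min x
    rw [← List.foldl_map (f := c)
      (g := fun (m : Option Int) (cv : Int) => some (match m with | none => cv | some x => min x cv)), hmapc, hxt]
    simp only [List.foldl_cons]
    rw [foldl_optmin]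
    rfl
  · show (((List.range K).foldl (fun m j => some (match m with | none => c j | some x => max x (c j))) none).getD 0) = t.foldl max x
    rw [← List.foldl_map (f := c)
      (g := fun (m : Option Int) (cv : Int) => some (match m with | none => cv | some x => max x cv)), hmapc, hxt]
    simp only [List.foldl_cons]
    rw [foldl_optmax]
    rfl
  · show ((List.range K).foldl (fun cnt j => cnt + (if c j > (PySem.List.pyGet? nums ((i : Int) * k + PySem.Int.mod ((j : Int) + 1) k)).getD 0 then 1 else 0)) (0 : Int)) = (cdesc (x :: t) : Int)
    rw [PySem.List.foldl_add]
    have hmapg : (List.range K).map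
          (fun j => if c j > (PySem.List.pyGet? nums ((i : Int) * k + PySem.Int.mod ((j : Int) + 1) k)).getD 0 then (1 : Int) else 0)
        = (List.range K).map
          (fun j => if (fun j => decide (s.getD j 0 > s.getD ((j + 1) % K) 0)) j = true then (1 : Int) else 0) := by
      apply List.map_congr_left
      intro j hj
      have hjK : j < K := List.mem_range.mp hj
      have hmod : PySem.Int.mod ((j : Int) + 1) k = (((j + 1) % K : Nat) : Int) := by
        rw [hkK]
        have hc1 : ((j : Int) + 1) = ((j + 1 : Nat) : Int) := by push_cast; ring
        rw [hc1, PySem.Int.mod_natCast]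
      have hnext : (PySem.List.pyGet? nums ((i : Int) * k + PySem.Int.mod ((j : Int) + 1) k)).getD 0 = c ((j + 1) % K) := by
        rw [hmod]
      have hmK : (j + 1) % K < K := Nat.mod_lt _ (by omega)
      rw [hnext, hc_eq j hjK, hc_eq _ hmK]
      simp
    rw [hmapg, PySem.List.sum_map_ite_one_zero]
    have hcd : cdesc (x :: t) = (List.range K).countP (fun j => decide (s.getD j 0 > s.getD ((j + 1) % K) 0)) := by
      rw [← hxt, cdesc, hlen]
    rw [hcd]
    simp

theorem chunks_nonpos (k : Int) (nums : List Int) (hneg : k < 0) :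
    PySem.Int.floordiv (nums.length : Int) k ≤ 0 := by
  by_contra h
  push_neg at h
  have hmod := PySem.Int.mod_neg_bounds (nums.length : Int) hneg
  have hdm := PySem.Int.floordiv_mul_add_mod (nums.length : Int) k
  have hn : (0 : Int) ≤ (nums.length : Int) := Int.natCast_nonneg _
  nlinarith

-- ===== VERDICT (by name: the statement is the Claim_ definition above) =====
theorem operation_spec : Claim_equal_operation := by
  intro k nums _hdom hkne
  show operation k nums = operation_alt k nums
  rcases lt_or_gt_of_ne hkne with hneg | hpos
  · have hC : PySem.Int.floordiv (nums.length : Int) k ≤ 0 := chunks_nonpos k nums hneg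
    have h0 : (PySem.Int.floordiv (nums.length : Int) k).toNat = 0 := by omega
    rw [operation, operation_alt]
    simp [h0, opLoop1, altLoop, opLoop2]
  · rw [operation, operation_alt]
    rw [opLoop1_char, altLoop_char k nums hpos]
    set C := (PySem.Int.floordiv (nums.length : Int) k).toNat with hCdef
    have habs : ∀ i ∈ List.range C, ∃ x t, csOf k nums i = x :: t ∧ (csOf k nums i).length = k.toNat ∧
        chunkTrip k nums i = (t.foldl min x, t.foldl max x, (cdesc (x :: t) : Int)) := by
      intro i hi
      apply chunk_abs k nums hpos
      have := List.mem_range.mp hi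
      omega
    have hcongr : ∀ i ∈ List.range C,
        (decide ((chunkTrip k nums i).2.2 ≤ 1)) =
          altRotOk (csOf k nums i) (PySem.List.sorted (csOf k nums i) (fun x => x)) k := by
      intro i hi
      obtain ⟨x, t, hcs, hlen, htrip⟩ := habs i hi
      rw [rotOk_iff k (csOf k nums i) hpos hlen (by rw [hcs]; simp), htrip, hcs]
      simp only
      have : ((cdesc (x :: t) : Int) ≤ 1) ↔ (cdesc (x :: t) ≤ 1) := by omega
      rw [decide_eq_decide.mpr this]
    have hallEq : (List.range C).all (fun i => decide ((chunkTrip k nums i).2.2 ≤ 1)) =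
        (List.range C).all (fun i =>
          altRotOk (csOf k nums i) (PySem.List.sorted (csOf k nums i) (fun x => x)) k) := by
      rw [Bool.eq_iff_iff, List.all_eq_true, List.all_eq_true]
      constructor <;> intro h i hi
      · rw [← hcongr i hi]; exact h i hi
      · rw [hcongr i hi]; exact h i hi
    by_cases hA : (List.range C).all (fun i => decide ((chunkTrip k nums i).2.2 ≤ 1)) = true
    · rw [if_pos hA, if_pos (hallEq ▸ hA)]
      simp only [List.nil_append]
      show opLoop2 ((List.range C).map (fun i => ((chunkTrip k nums i).1, (chunkTrip k nums i).2.1))) = _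
      rw [Bool.eq_iff_iff, opLoop2_iff]
      refine Iff.trans ?_ (flatOk_iff _).symm
      rw [List.flatMap_def]
      have hmembers : ∀ c ∈ (List.range C).map (fun i => PySem.List.sorted (csOf k nums i) (fun x => x)),
          c ≠ [] ∧ c.Pairwise (fun a b : Int => a ≤ b) := by
        intro c hc
        obtain ⟨i, hi, rfl⟩ := List.mem_map.mp hc
        obtain ⟨x, t, hcs, hlen, htrip⟩ := habs i hi
        constructor
        · rw [Ne, PySem.List.sorted_eq_nil_iff, hcs]
          simp
        · exact PySem.List.sorted_pairwise (csOf k nums i) (fun x => x)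
      rw [chain_flatten _ hmembers, List.isChain_map, List.isChain_map]
      rw [List.isChain_iff_getElem, List.isChain_iff_getElem]
      constructor <;> intro h idx hidx <;>
        [skip; skip] <;> {
        have hidx' : idx + 1 < C := by simpa using hidx
        have h1 := habs idx (List.mem_range.mpr (by omega))
        have h2 := habs (idx + 1) (List.mem_range.mpr (by omega))
        obtain ⟨x1, t1, hcs1, _, htrip1⟩ := h1
        obtain ⟨x2, t2, hcs2, _, htrip2⟩ := h2
        have hspec := h idx (by simpa using hidx')
        simp only [List.getElem_range] at hspec ⊢
        first
        | (rw [hcs1, hcs2, sorted_last?, sorted_head?]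
           rw [htrip1, htrip2] at hspec
           simp only at hspec
           intro a ha b hb
           simp only [Option.mem_def, Option.some.injEq] at ha hb
           omega)
        | (rw [htrip1, htrip2]
           simp only
           rw [hcs1, hcs2, sorted_last?, sorted_head?] at hspec
           have := hspec (t1.foldl max x1) rfl (t2.foldl min x2) rfl
           exact this) }
    · rw [if_neg hA, if_neg (by rw [← hallEq]; exact hA)]
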